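-- pv_equiv track=rewrite | github.com/asimcode2050/Asim-Code-Youtube-Channel-Code | python/machine_learning/d_sep.py | find_degrees_of_separation
-- ===== SOURCE A (Python) =====
-- from collections import deque
--
-- def find_degrees_of_separation(graph, start_actor, target_actor):
--     if start_actor == target_actor:
--         return 0
--     visited = set()
--     queue = deque([(start_actor, 0)])
--     while queue:
--         current_actor, degrees = queue.popleft()
--         if current_actor == target_actor:
--             return degrees
--         if current_actor not in visited:
--             visited.add(current_actor)
--             for neighbor in graph[current_actor]:
--                 if neighbor not in visited:
--                     queue.append((neighbor, degrees + 1))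
--     return -1
-- ===== SOURCE B (Python) =====
-- def find_degrees_of_separation(graph, start_actor, target_actor):
--     if start_actor == target_actor:
--         return 0
--     reach = {start_actor}
--     level = 0
--     while True:
--         if target_actor in reach:
--             return level
--         expanded = set(reach)
--         for actor, neighbors in graph.items():
--             if actor in reach:
--                 expanded.update(neighbors)
--         if expanded == reach:
--             return -1
--         reach = expanded
--         level += 1
-- ===== Notes on version B (the rewrite author's own statement) =====
-- stated objective: alternative
-- what changed: Replaced the queue-and-visited-set BFS by round-based reachability relaxation: keep one reachable set, each round scan the whole edge list and add neighbors of already-reached actors, return the round number when the target enters the set and -1 on stabilization; no queue, no visited set, no per-node dict indexing.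
-- outside the precondition, e.g. on find_degrees_of_separation({'a': ['b', 'c'], 'b': []}, 'a', 'b'): A returns 1, B returns 1; on find_degrees_of_separation({'a': ['b']}, 'a', 'c'): A raises KeyError, B returns -1
import Mathlib
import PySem

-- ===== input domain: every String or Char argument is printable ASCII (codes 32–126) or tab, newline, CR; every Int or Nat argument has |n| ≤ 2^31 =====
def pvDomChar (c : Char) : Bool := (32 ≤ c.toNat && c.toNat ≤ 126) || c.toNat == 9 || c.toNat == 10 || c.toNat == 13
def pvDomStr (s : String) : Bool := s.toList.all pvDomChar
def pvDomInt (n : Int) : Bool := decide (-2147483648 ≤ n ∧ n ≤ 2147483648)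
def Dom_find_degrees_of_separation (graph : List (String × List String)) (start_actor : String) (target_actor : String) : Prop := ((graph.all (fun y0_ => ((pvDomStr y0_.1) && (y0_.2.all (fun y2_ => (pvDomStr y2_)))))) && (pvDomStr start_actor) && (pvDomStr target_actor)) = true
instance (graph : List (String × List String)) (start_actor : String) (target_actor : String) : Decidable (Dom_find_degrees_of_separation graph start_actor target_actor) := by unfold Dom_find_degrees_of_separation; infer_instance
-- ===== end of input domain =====

-- B replaces A's queue-and-visited-set BFS by round-based reachability relaxation: one
-- reachable set, each round a scan of the whole edge list; same results, different algorithm.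

-- ===== PORT A =====
-- dict lookup graph[k] (first match; none = KeyError, excluded by Pre_)
def pvGet (graph : List (String × List String)) (k : String) : Option (List String) :=
  (PySem.Dict.mk graph).get? k

-- number of graph keys not yet visited: the termination measure of A's loop
def pvUnvisited (graph : List (String × List String)) (visited : PySem.Set String) : Nat :=
  ((graph.map Prod.fst).filter (fun k => !visited.contains k)).length

-- termination helper: a successful lookup means the key is among the graph's keys
lemma pv_mem_keys_of_pvGet (graph : List (String × List String)) (k : String)
    (ns : List String) (h : pvGet graph k = some ns) : k ∈ graph.map Prod.fst := by
  induction graph with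
  | nil => simp [pvGet, PySem.Dict.get?] at h
  | cons p rest ih =>
    rcases p with ⟨a, v⟩
    rw [pvGet, PySem.Dict.get?_mk_cons] at h
    by_cases hak : a = k
    · simp [hak]
    · simp only [List.map_cons, List.mem_cons]
      right
      exact ih (by simpa [hak] using h)

-- termination helper: a strict filter-length fact
lemma pv_length_filter_lt (l : List String) (P Q : String → Bool)
    (hPQ : ∀ k, Q k = true → P k = true) (c : String) (hc : c ∈ l)
    (hQc : Q c = false) (hPc : P c = true) :
    (l.filter Q).length < (l.filter P).length := by
  have hle : ∀ (m : List String), (m.filter Q).length ≤ (m.filter P).length := by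
    intro m
    rw [← List.countP_eq_length_filter, ← List.countP_eq_length_filter]
    exact List.countP_mono_left (fun k _ => hPQ k)
  induction l with
  | nil => simp at hc
  | cons x l ih =>
    by_cases hxc : x = c
    · subst hxc
      simp only [List.filter_cons, hQc, hPc]
      have := hle l
      simp only [Bool.false_eq_true, if_false, if_true, List.length_cons]
      omega
    · have hc' : c ∈ l := by
        rcases List.mem_cons.mp hc with h | h
        · exact absurd h.symm hxc
        · exact h
      have := ih hc'
      simp only [List.filter_cons]
      cases hQx : Q x
      · cases hPx : P x <;> simp <;> omega
      · have := hPQ x hQx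
        simp [this]
        omega

-- termination helper: visiting an unvisited key strictly shrinks the measure
lemma pvUnvisited_add_lt (graph : List (String × List String)) (visited : PySem.Set String)
    (cur : String) (ns : List String) (hget : pvGet graph cur = some ns)
    (hvis : visited.contains cur = false) :
    pvUnvisited graph (PySem.Set.add visited cur) < pvUnvisited graph visited := by
  have hmem : cur ∈ graph.map Prod.fst := pv_mem_keys_of_pvGet graph cur ns hget
  have hne : cur ∉ visited := by simpa using hvis
  have hadd : PySem.Set.add visited cur = visited ++ [cur] := by
    simp [PySem.Set.add, hne]
  rw [pvUnvisited, pvUnvisited, hadd]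
  apply pv_length_filter_lt _ _ _ ?_ cur hmem ?_ ?_
  · intro k hk
    simp at hk ⊢
    exact hk.1
  · simp
  · simpa using hvis

-- A's while loop over the deque of (actor, degrees) pairs
def find_degrees_of_separation_aux (graph : List (String × List String)) (target : String)
    (visited : PySem.Set String) (queue : List (String × Int)) : Int :=
  match queue with
  | [] => -1
  | (cur, deg) :: rest =>
    if cur == target then deg
    else if hv : visited.contains cur then find_degrees_of_separation_aux graph target visited rest
    else
      match hg : pvGet graph cur with
      | none => -2  -- KeyError in Python; excluded by Pre_ (value immaterial there)
      | some ns =>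
        find_degrees_of_separation_aux graph target (PySem.Set.add visited cur)
          (rest ++ (ns.filter (fun nb => !(PySem.Set.add visited cur).contains nb)).map
            (fun nb => (nb, deg + 1)))
termination_by (pvUnvisited graph visited, queue.length)
decreasing_by
  · exact Prod.Lex.right _ (by simp)
  · exact Prod.Lex.left _ _ (pvUnvisited_add_lt graph visited cur ns hg (by simpa using hv))

def find_degrees_of_separation (graph : List (String × List String)) (start_actor : String)
    (target_actor : String) : Int :=
  if start_actor == target_actor then 0
  else find_degrees_of_separation_aux graph target_actor PySem.Set.empty [(start_actor, 0)]

-- ===== PORT B =====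
-- one relaxation round: expanded = set(reach); for (actor, neighbors) in graph.items():
--   if actor in reach: expanded.update(neighbors)
def pvRelax (graph : List (String × List String)) (reach : PySem.Set String) :
    PySem.Set String :=
  graph.foldl
    (fun expanded p =>
      if PySem.Set.contains reach p.1 then PySem.Set.update expanded p.2 else expanded)
    reach

-- membership in a relaxation round (also the termination argument of the loop below)
lemma pv_mem_relax (graph : List (String × List String)) (reach : PySem.Set String)
    (x : String) :
    x ∈ pvRelax graph reach ↔ x ∈ reach ∨ ∃ p ∈ graph, p.1 ∈ reach ∧ x ∈ p.2 := by
  rw [pvRelax]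
  have main : ∀ (g : List (String × List String)) (acc : PySem.Set String),
      x ∈ g.foldl (fun expanded p =>
          if PySem.Set.contains reach p.1 then PySem.Set.update expanded p.2 else expanded) acc
        ↔ x ∈ acc ∨ ∃ p ∈ g, p.1 ∈ reach ∧ x ∈ p.2 := by
    intro g
    induction g with
    | nil => simp
    | cons q g ih =>
      intro acc
      simp only [List.foldl_cons]
      rw [ih]
      by_cases hq : PySem.Set.contains reach q.1
      · have hq' : q.1 ∈ reach := (PySem.Set.contains_iff _ _).mp hq
        simp only [hq, if_true, PySem.Set.mem_update, List.mem_cons]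
        constructor
        · rintro (⟨h | h⟩ | ⟨p, hp, h1, h2⟩)
          · exact Or.inl h
          · exact Or.inr ⟨q, Or.inl rfl, hq', h⟩
          · exact Or.inr ⟨p, Or.inr hp, h1, h2⟩
        · rintro (h | ⟨p, hp | hp, h1, h2⟩)
          · exact Or.inl (Or.inl h)
          · exact Or.inl (Or.inr (hp ▸ h2))
          · exact Or.inr ⟨p, hp, h1, h2⟩
      · have hq' : q.1 ∉ reach := by simpa using hq
        simp only [hq, Bool.false_eq_true, if_false, List.mem_cons]
        constructor
        · rintro (h | ⟨p, hp, h1, h2⟩)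
          · exact Or.inl h
          · exact Or.inr ⟨p, Or.inr hp, h1, h2⟩
        · rintro (h | ⟨p, hp | hp, h1, h2⟩)
          · exact Or.inl h
          · exact absurd (hp ▸ h1) hq'
          · exact Or.inr ⟨p, hp, h1, h2⟩
  exact main graph reach

-- reach only grows
lemma pv_reach_subset_relax (graph : List (String × List String)) (reach : PySem.Set String)
    (x : String) (hx : x ∈ reach) : x ∈ pvRelax graph reach :=
  (pv_mem_relax graph reach x).mpr (Or.inl hx)

-- B's while True loop: one level per relaxation round
def pvBFSLoop (graph : List (String × List String)) (target : String)
    (reach : PySem.Set String) (level : Int) : Int :=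
  if PySem.Set.contains reach target then level
  else
    if hq : PySem.Set.equal (pvRelax graph reach) reach = true then -1
    else pvBFSLoop graph target (pvRelax graph reach) (level + 1)
termination_by ((graph.flatMap (fun p => p.2)).filter (fun x => !(PySem.Set.contains reach x))).length
decreasing_by
  have hne : ¬ (∀ x, x ∈ pvRelax graph reach ↔ x ∈ reach) := fun h => hq ((PySem.Set.equal_iff _ _).mpr h)
  have hex : ∃ x, x ∈ pvRelax graph reach ∧ x ∉ reach := by
    by_contra hall
    apply hne
    intro x
    constructor
    · intro hx
      by_contra hxr
      exact hall ⟨x, hx, hxr⟩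
    · exact pv_reach_subset_relax graph reach x
  obtain ⟨x, hxin, hxout⟩ := hex
  have hflat : x ∈ graph.flatMap (fun p => p.2) := by
    rcases (pv_mem_relax graph reach x).mp hxin with h | ⟨p, hp, _, h2⟩
    · exact absurd h hxout
    · exact List.mem_flatMap.mpr ⟨p, hp, h2⟩
  apply pv_length_filter_lt _ _ _ ?_ x hflat ?_ ?_
  · intro k hk
    simp only [Bool.not_eq_true'] at hk ⊢
    cases h : PySem.Set.contains reach k with
    | false => rfl
    | true =>
      have hmem := pv_reach_subset_relax graph reach k ((PySem.Set.contains_iff _ _).mp h)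
      have htrue := (PySem.Set.contains_iff _ _).mpr hmem
      rw [hk] at htrue
      simp at htrue
  · simp only [Bool.not_eq_false']
    exact (PySem.Set.contains_iff _ _).mpr hxin
  · simp only [Bool.not_eq_true']
    cases h : PySem.Set.contains reach x with
    | false => rfl
    | true => exact absurd ((PySem.Set.contains_iff _ _).mp h) hxout

def find_degrees_of_separation_alt (graph : List (String × List String)) (start_actor : String)
    (target_actor : String) : Int :=
  if start_actor == target_actor then 0
  else pvBFSLoop graph target_actor (PySem.Set.ofList [start_actor]) 0

-- ===== PRECONDITION & SPEC =====
-- Pre_ requires distinct keys (a Python dict always has them, a Lean association list need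
-- not), and that the start actor is a graph key and every listed neighbor is a graph key or
-- the target (returned before being indexed): this excludes every input where A's BFS raises
-- KeyError, and (conservatively) some graphs with a dangling non-target neighbor name on
-- which A happens to return before indexing it.
def Pre_find_degrees_of_separation (graph : List (String × List String)) (start_actor : String)
    (target_actor : String) : Prop :=
  (graph.map Prod.fst).Nodup ∧
    (start_actor = target_actor ∨
      (start_actor ∈ graph.map Prod.fst ∧
        ∀ p ∈ graph, ∀ nb ∈ p.2, nb ∈ graph.map Prod.fst ∨ nb = target_actor))
instance (graph : List (String × List String)) (start_actor : String) (target_actor : String) : Decidable (Pre_find_degrees_of_separation graph start_actor target_actor) := by unfold Pre_find_degrees_of_separation; infer_instance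

def pvWitness_find_degrees_of_separation : (List (String × List String)) × String × String :=
  ([("a", ["b"]), ("b", ["a"]), ("c", [])], "a", "b")

def Spec_find_degrees_of_separation (graph : List (String × List String)) (start_actor : String) (target_actor : String) (out : Int) : Prop := out = find_degrees_of_separation_alt graph start_actor target_actor
instance (graph : List (String × List String)) (start_actor : String) (target_actor : String) (out : Int) : Decidable (Spec_find_degrees_of_separation graph start_actor target_actor out) := by unfold Spec_find_degrees_of_separation; infer_instance

-- ===== CLAIM (what is proved, stated in full; the proofs are below) =====
def Claim_equal_find_degrees_of_separation : Prop := ∀ (graph : List (String × List String)) (start_actor : String) (target_actor : String), Dom_find_degrees_of_separation graph start_actor target_actor → Pre_find_degrees_of_separation graph start_actor target_actor → Spec_find_degrees_of_separation graph start_actor target_actor (find_degrees_of_separation graph start_actor target_actor)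

-- ===== LEMMAS AND PROOFS =====

-- pvGet facts
lemma pvGet_mem (graph : List (String × List String)) (k : String) (ns : List String)
    (h : pvGet graph k = some ns) : (k, ns) ∈ graph := by
  induction graph with
  | nil => simp [pvGet, PySem.Dict.get?] at h
  | cons p rest ih =>
    rcases p with ⟨a, v⟩
    rw [pvGet, PySem.Dict.get?_mk_cons] at h
    by_cases hak : a = k
    · subst hak
      simp at h
      simp [h]
    · simp only [List.mem_cons]
      exact Or.inr (ih (by simpa [hak] using h))

lemma pvGet_some_of_mem_keys (graph : List (String × List String)) (k : String)
    (h : k ∈ graph.map Prod.fst) : ∃ ns, pvGet graph k = some ns := by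
  induction graph with
  | nil => simp at h
  | cons p rest ih =>
    rcases p with ⟨a, v⟩
    by_cases hak : a = k
    · exact ⟨v, by rw [pvGet, PySem.Dict.get?_mk_cons]; simp [hak]⟩
    · have h' : k ∈ rest.map Prod.fst := by
        simp only [List.map_cons, List.mem_cons] at h
        rcases h with h | h
        · exact absurd h.symm hak
        · exact h
      obtain ⟨ns, hns⟩ := ih h'
      exact ⟨ns, by rw [pvGet, PySem.Dict.get?_mk_cons]; simpa [hak] using hns⟩

lemma pvGet_of_nodup (graph : List (String × List String)) (k : String) (ns : List String)
    (hnd : (graph.map Prod.fst).Nodup) (h : (k, ns) ∈ graph) : pvGet graph k = some ns := by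
  induction graph with
  | nil => simp at h
  | cons p rest ih =>
    rcases p with ⟨a, v⟩
    rw [pvGet, PySem.Dict.get?_mk_cons]
    rcases List.mem_cons.mp h with h1 | h1
    · cases h1
      simp
    · have hnd' : a ∉ rest.map Prod.fst ∧ (rest.map Prod.fst).Nodup := by
        rw [List.map_cons, List.nodup_cons] at hnd
        exact hnd
      have hak : ¬ a = k := by
        intro hak
        subst hak
        exact hnd'.1 (List.mem_map.mpr ⟨(a, ns), h1, rfl⟩)
      simpa [hak] using ih hnd'.2 h1

-- A's inner processing of one frontier's worth of queue (used only by the proofs):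
-- process nodes in order, collecting the next level's nodes
def pvBInner (graph : List (String × List String)) (target : String) (level : Int)
    (visited : PySem.Set String) (frontier : List String) (next : List String) :
    Except Int (PySem.Set String × List String) :=
  match frontier with
  | [] => .ok (visited, next)
  | node :: rest =>
    if node == target then .error level
    else if visited.contains node then pvBInner graph target level visited rest next
    else
      match pvGet graph node with
      | none => .error (-2)
      | some ns =>
        pvBInner graph target level (PySem.Set.add visited node) rest
          (next ++ ns.filter (fun nb => !(PySem.Set.add visited node).contains nb))

-- a completed round either visits a new key or leaves the state unchanged
lemma pvBInner_ok_measure (graph : List (String × List String)) (target : String) (level : Int) :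
    ∀ (frontier : List String) (visited : PySem.Set String) (next : List String)
      (v' : PySem.Set String) (next' : List String),
      pvBInner graph target level visited frontier next = .ok (v', next') →
      pvUnvisited graph v' < pvUnvisited graph visited ∨ (v' = visited ∧ next' = next) := by
  intro frontier
  induction frontier with
  | nil =>
    intro visited next v' next' h
    rw [pvBInner] at h
    cases h
    right; exact ⟨rfl, rfl⟩
  | cons node rest ih =>
    intro visited next v' next' h
    rw [pvBInner] at h
    by_cases ht : node == target
    · simp [ht] at h
    · simp only [ht, Bool.false_eq_true, if_false] at h
      by_cases hv : visited.contains node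
      · simp only [hv, if_true] at h
        exact ih visited next v' next' h
      · simp only [hv, Bool.false_eq_true, if_false] at h
        cases hg : pvGet graph node with
        | none => rw [hg] at h; cases h
        | some ns =>
          rw [hg] at h
          have hlt : pvUnvisited graph (PySem.Set.add visited node) < pvUnvisited graph visited :=
            pvUnvisited_add_lt graph visited node ns hg (by simpa using hv)
          rcases ih _ _ _ _ h with h2 | ⟨h2, _⟩
          · left; omega
          · left; rw [h2]; exact hlt

-- the level-synchronous reading of A's queue loop (used only by the proofs)
def pvBLoop (graph : List (String × List String)) (target : String)
    (visited : PySem.Set String) (frontier : List String) (level : Int) : Int :=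
  if hf : frontier = [] then -1
  else
    match hb : pvBInner graph target level visited frontier [] with
    | .error r => r
    | .ok (v', next) => pvBLoop graph target v' next (level + 1)
termination_by (pvUnvisited graph visited, frontier.length)
decreasing_by
  rcases pvBInner_ok_measure graph target level frontier visited [] v' next hb with h | ⟨h1, h2⟩
  · exact Prod.Lex.left _ _ h
  · subst h1; subst h2
    exact Prod.Lex.right _ (by cases frontier <;> simp_all)

-- B's state after a partially processed round: finish the frontier, then loop
def pvBCont (graph : List (String × List String)) (target : String) (visited : PySem.Set String)
    (f g : List String) (d : Int) : Int :=
  match pvBInner graph target d visited f g with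
  | .error r => r
  | .ok (v', next) => if next = [] then -1 else pvBLoop graph target v' next (d + 1)

lemma pvBLoop_eq_bCont (graph : List (String × List String)) (target : String)
    (visited : PySem.Set String) (f : List String) (d : Int) (hf : f ≠ []) :
    pvBLoop graph target visited f d = pvBCont graph target visited f [] d := by
  rw [pvBLoop, pvBCont, dif_neg hf]
  cases hb : pvBInner graph target d visited f [] with
  | error r => rfl
  | ok p =>
    rcases p with ⟨v', next⟩
    by_cases hn : next = []
    · subst hn
      simp only [if_true]
      rw [pvBLoop]
      simp
    · simp [hn]

-- the key invariant: A's queue is always (rest of level d) ++ (collected level d+1),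
-- and A's processing of it is exactly one level-synchronous round in progress
lemma pv_main (graph : List (String × List String)) (target : String) :
    ∀ (N : Nat) (visited : PySem.Set String), pvUnvisited graph visited < N →
    ∀ (M : Nat) (f g : List String), f.length + 2 * g.length < M →
    ∀ (d : Int),
      find_degrees_of_separation_aux graph target visited
        (f.map (fun s => (s, d)) ++ g.map (fun s => (s, d + 1))) =
      pvBCont graph target visited f g d := by
  intro N
  induction N with
  | zero => intro visited h; omega
  | succ N ihN =>
    intro visited hN M
    induction M with
    | zero => intro f g h; omega
    | succ M ihM =>
      intro f g hM d
      cases f with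
      | nil =>
        cases g with
        | nil =>
          rw [find_degrees_of_separation_aux.eq_def, pvBCont, pvBInner]
          simp
        | cons y ys =>
          simp only [List.map_nil, List.nil_append]
          have h1 := ihM (y :: ys) [] (by simp at hM ⊢; omega) (d + 1)
          simp only [List.map_nil, List.append_nil] at h1
          have h2 : pvBCont graph target visited [] (y :: ys) d =
              pvBCont graph target visited (y :: ys) [] (d + 1) := by
            rw [pvBCont, pvBInner]
            simp [pvBLoop_eq_bCont graph target visited (y :: ys) (d + 1) (by simp)]
          rw [h1]
          exact h2.symm
      | cons x f' =>
        simp only [List.map_cons, List.cons_append]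
        rw [find_degrees_of_separation_aux.eq_def, pvBCont, pvBInner]
        by_cases ht : x == target
        · simp [ht]
        · by_cases hv : visited.contains x
          · simp only [ht, Bool.false_eq_true, if_false, hv, dif_pos, if_true]
            have h1 := ihM f' g (by simp at hM ⊢; omega) d
            rw [h1, pvBCont]
          · simp only [ht, Bool.false_eq_true, if_false, hv, dif_neg, not_false_iff]
            cases hg : pvGet graph x with
            | none => simp
            | some ns =>
              simp only []
              have hlt : pvUnvisited graph (PySem.Set.add visited x) < pvUnvisited graph visited :=
                pvUnvisited_add_lt graph visited x ns hg (by simpa using hv)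
              have hqueue :
                  (f'.map (fun s => (s, d)) ++ g.map (fun s => (s, d + 1))) ++
                    (ns.filter (fun nb => !(PySem.Set.add visited x).contains nb)).map
                      (fun nb => (nb, d + 1)) =
                  f'.map (fun s => (s, d)) ++
                    (g ++ ns.filter (fun nb => !(PySem.Set.add visited x).contains nb)).map
                      (fun s => (s, d + 1)) := by
                rw [List.map_append, List.append_assoc]
              have h1 := ihN (PySem.Set.add visited x) (by omega)
                (f'.length + 2 * (g ++ ns.filter (fun nb => !(PySem.Set.add visited x).contains nb)).length + 1)
                f' (g ++ ns.filter (fun nb => !(PySem.Set.add visited x).contains nb)) (by omega) d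
              rw [hqueue, h1, pvBCont]

-- if the target sits in the frontier (and everything before it is a key or the target),
-- the round returns the current level
lemma pv_inner_target (graph : List (String × List String)) (target : String) (level : Int) :
    ∀ (F : List String) (V : PySem.Set String) (next : List String),
      target ∈ F → (∀ n ∈ F, n = target ∨ n ∈ graph.map Prod.fst) →
      pvBInner graph target level V F next = .error level := by
  intro F
  induction F with
  | nil => intro V next h; simp at h
  | cons n F ih =>
    intro V next hmem hkeys
    rw [pvBInner]
    by_cases hnt : n == target
    · simp [hnt]
    · have hnt' : n ≠ target := by simpa using hnt
      have htF : target ∈ F := by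
        rcases List.mem_cons.mp hmem with h | h
        · exact absurd h.symm hnt'
        · exact h
      simp only [hnt, Bool.false_eq_true, if_false]
      by_cases hv : V.contains n
      · simp only [hv, if_true]
        exact ih V next htF (fun m hm => hkeys m (List.mem_cons_of_mem _ hm))
      · simp only [hv, Bool.false_eq_true, if_false]
        have hk : n ∈ graph.map Prod.fst := by
          rcases hkeys n (List.mem_cons_self ..) with h | h
          · exact absurd h hnt'
          · exact h
        obtain ⟨ns, hns⟩ := pvGet_some_of_mem_keys graph n hk
        rw [hns]
        exact ih _ _ htF (fun m hm => hkeys m (List.mem_cons_of_mem _ hm))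

-- a frontier of already-visited non-target nodes is a no-op round
lemma pv_inner_visited (graph : List (String × List String)) (target : String) (level : Int) :
    ∀ (F : List String) (V : PySem.Set String) (next : List String),
      (∀ n ∈ F, n ∈ V) → target ∉ F →
      pvBInner graph target level V F next = .ok (V, next) := by
  intro F
  induction F with
  | nil => intro V next _ _; rw [pvBInner]
  | cons n F ih =>
    intro V next hvis htgt
    rw [pvBInner]
    have hnt : (n == target) = false := by
      simp only [beq_eq_false_iff_ne, ne_eq]
      exact fun h => htgt (h ▸ List.mem_cons_self ..)
    have hv : V.contains n = true := (PySem.Set.contains_iff _ _).mpr (hvis n (List.mem_cons_self ..))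
    simp only [hnt, Bool.false_eq_true, if_false, hv, if_true]
    exact ih V next (fun m hm => hvis m (List.mem_cons_of_mem _ hm))
      (fun h => htgt (List.mem_cons_of_mem _ h))

-- the workhorse: a round with no target and all keys succeeds, and its result set is
-- characterized up to membership
lemma pv_inner_ok (graph : List (String × List String)) (target : String) (level : Int) :
    ∀ (F : List String) (V : PySem.Set String) (next : List String),
      (∀ n ∈ F, n ∈ graph.map Prod.fst) → target ∉ F →
      ∃ V' F'', pvBInner graph target level V F next = .ok (V', F'') ∧
        (∀ x, x ∈ V' ↔ (x ∈ V ∨ x ∈ F)) ∧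
        (∀ x ∈ F'', x ∈ next ∨ ∃ p ∈ graph, p.1 ∈ F ∧ x ∈ p.2) ∧
        (∀ x ∈ next, x ∈ F'') ∧
        (∀ n ∈ F, n ∈ V ∨ ∀ ns, pvGet graph n = some ns → ∀ nb ∈ ns, nb ∈ V' ∨ nb ∈ F'') := by
  intro F
  induction F with
  | nil =>
    intro V next _ _
    refine ⟨V, next, by rw [pvBInner], by simp, fun x hx => Or.inl hx, fun x hx => hx, by simp⟩
  | cons n F ih =>
    intro V next hkeys htgt
    have hnt : (n == target) = false := by
      simp only [beq_eq_false_iff_ne, ne_eq]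
      exact fun h => htgt (h ▸ List.mem_cons_self ..)
    have htgtF : target ∉ F := fun h => htgt (List.mem_cons_of_mem _ h)
    have hkeysF : ∀ m ∈ F, m ∈ graph.map Prod.fst :=
      fun m hm => hkeys m (List.mem_cons_of_mem _ hm)
    by_cases hv : V.contains n
    · obtain ⟨V', F'', heq, ha, hb, hc, hd⟩ := ih V next hkeysF htgtF
      have hnV : n ∈ V := (PySem.Set.contains_iff _ _).mp hv
      refine ⟨V', F'', ?_, ?_, ?_, hc, ?_⟩
      · rw [pvBInner]
        simp only [hnt, Bool.false_eq_true, if_false, hv, if_true]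
        exact heq
      · intro x
        rw [ha]
        constructor
        · rintro (h | h)
          · exact Or.inl h
          · exact Or.inr (List.mem_cons_of_mem _ h)
        · rintro (h | h)
          · exact Or.inl h
          · rcases List.mem_cons.mp h with h1 | h1
            · exact Or.inl (h1 ▸ hnV)
            · exact Or.inr h1
      · intro x hx
        rcases hb x hx with h | ⟨p, hp, h1, h2⟩
        · exact Or.inl h
        · exact Or.inr ⟨p, hp, List.mem_cons_of_mem _ h1, h2⟩
      · intro m hm
        rcases List.mem_cons.mp hm with h1 | h1
        · exact Or.inl (h1 ▸ hnV)
        · exact hd m h1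
    · obtain ⟨ns, hns⟩ := pvGet_some_of_mem_keys graph n (hkeys n (List.mem_cons_self ..))
      obtain ⟨V', F'', heq, ha, hb, hc, hd⟩ :=
        ih (PySem.Set.add V n)
          (next ++ ns.filter (fun nb => !(PySem.Set.add V n).contains nb)) hkeysF htgtF
      have hmemadd : ∀ x, x ∈ PySem.Set.add V n ↔ x ∈ V ∨ x = n :=
        fun x => PySem.Set.mem_add V n x
      have hhead : ∀ ns', pvGet graph n = some ns' → ∀ nb ∈ ns', nb ∈ V' ∨ nb ∈ F'' := by
        intro ns' hns' nb hnb
        rw [hns] at hns'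
        cases hns'
        by_cases hnbv : (PySem.Set.add V n).contains nb
        · exact Or.inl ((ha nb).mpr (Or.inl ((PySem.Set.contains_iff _ _).mp hnbv)))
        · refine Or.inr (hc nb ?_)
          refine List.mem_append_right _ ?_
          rw [List.mem_filter]
          refine ⟨hnb, ?_⟩
          simp only [Bool.not_eq_true']
          simpa using hnbv
      refine ⟨V', F'', ?_, ?_, ?_, ?_, ?_⟩
      · rw [pvBInner]
        simp only [hnt, Bool.false_eq_true, if_false, hv, if_false]
        rw [hns]
        exact heq
      · intro x
        rw [ha, hmemadd]
        constructor
        · rintro ((h | h) | h)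
          · exact Or.inl h
          · exact Or.inr (h ▸ List.mem_cons_self ..)
          · exact Or.inr (List.mem_cons_of_mem _ h)
        · rintro (h | h)
          · exact Or.inl (Or.inl h)
          · rcases List.mem_cons.mp h with h1 | h1
            · exact Or.inl (Or.inr h1)
            · exact Or.inr h1
      · intro x hx
        rcases hb x hx with h | ⟨p, hp, h1, h2⟩
        · rcases List.mem_append.mp h with h1 | h1
          · exact Or.inl h1
          · have : x ∈ ns := (List.mem_filter.mp h1).1
            exact Or.inr ⟨(n, ns), pvGet_mem graph n ns hns, List.mem_cons_self .., this⟩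
        · exact Or.inr ⟨p, hp, List.mem_cons_of_mem _ h1, h2⟩
      · intro x hx
        exact hc x (List.mem_append_left _ hx)
      · intro m hm
        rcases List.mem_cons.mp hm with h1 | h1
        · subst h1
          exact Or.inr hhead
        · rcases hd m h1 with h2 | h2
          · rcases (hmemadd m).mp h2 with h3 | h3
            · exact Or.inl h3
            · exact Or.inr (h3 ▸ hhead)
          · exact Or.inr h2

-- the main simulation: the level-synchronous reading of A equals B's relaxation loop
lemma pv_loop_eq (graph : List (String × List String)) (target : String)
    (hnd : (graph.map Prod.fst).Nodup)
    (hcl : ∀ p ∈ graph, ∀ nb ∈ p.2, nb ∈ graph.map Prod.fst ∨ nb = target) :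
    ∀ (N : Nat) (V : PySem.Set String) (F : List String) (reach : PySem.Set String) (d : Int),
      ((target :: graph.map Prod.fst).filter
        (fun x => !(PySem.Set.contains reach x))).length < N →
      (∀ x, (x ∈ V ∨ x ∈ F) ↔ x ∈ reach) →
      target ∉ V →
      (∀ p ∈ graph, p.1 ∈ V → ∀ nb ∈ p.2, nb ∈ reach) →
      (∀ x ∈ reach, x ∈ graph.map Prod.fst ∨ x = target) →
      pvBLoop graph target V F d = pvBFSLoop graph target reach d := by
  intro N
  induction N with
  | zero => intro V F reach d h; omega
  | succ N ih =>
    intro V F reach d hN h1 h2 h3 h5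
    rw [pvBFSLoop]
    by_cases htF : target ∈ F
    · have htr : target ∈ reach := (h1 target).mp (Or.inr htF)
      rw [if_pos ((PySem.Set.contains_iff _ _).mpr htr)]
      rw [pvBLoop, dif_neg (List.ne_nil_of_mem htF)]
      rw [pv_inner_target graph target d F V [] htF ?_]
      intro n hn
      rcases h5 n ((h1 n).mp (Or.inr hn)) with h | h
      · exact Or.inr h
      · exact Or.inl h
    · have htr : target ∉ reach := by
        intro h
        rcases (h1 target).mpr h with h' | h'
        · exact h2 h'
        · exact htF h'
      rw [if_neg (by simpa [PySem.Set.contains_iff] using htr)]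
      have hE := pv_mem_relax graph reach
      have hFkeys : ∀ n ∈ F, n ∈ graph.map Prod.fst := by
        intro n hn
        rcases h5 n ((h1 n).mp (Or.inr hn)) with h | h
        · exact h
        · exact absurd (h ▸ hn) htF
      cases F with
      | nil =>
        have hstable : ∀ x, x ∈ pvRelax graph reach ↔ x ∈ reach := by
          intro x
          constructor
          · intro hx
            rcases (hE x).mp hx with h | ⟨p, hp, hp1, hp2⟩
            · exact h
            · have : p.1 ∈ V := by
                rcases (h1 p.1).mpr hp1 with h' | h'
                · exact h'
                · simp at h'
              exact h3 p hp this _ hp2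
          · exact pv_reach_subset_relax graph reach x
        rw [dif_pos ((PySem.Set.equal_iff _ _).mpr hstable)]
        rw [pvBLoop]
        simp
      | cons y F0 =>
        obtain ⟨V', F'', heq, ha, hb, hc, hd⟩ :=
          pv_inner_ok graph target d (y :: F0) V [] hFkeys htF
        rw [pvBLoop, dif_neg (by simp)]
        rw [heq]
        show pvBLoop graph target V' F'' (d + 1) = _
        have hsub : ∀ x ∈ reach, x ∈ pvRelax graph reach := pv_reach_subset_relax graph reach
        have hV'reach : ∀ x, x ∈ V' ↔ x ∈ reach := by
          intro x
          rw [ha, h1]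
        have hF''exp : ∀ x ∈ F'', x ∈ pvRelax graph reach := by
          intro x hx
          rcases hb x hx with h | ⟨p, hp, hp1, hp2⟩
          · simp at h
          · exact (hE x).mpr (Or.inr ⟨p, hp, (h1 p.1).mp (Or.inr hp1), hp2⟩)
        have hexp_sub : ∀ x ∈ pvRelax graph reach, x ∈ V' ∨ x ∈ F'' := by
          intro x hx
          rcases (hE x).mp hx with h | ⟨p, hp, hp1, hp2⟩
          · exact Or.inl ((hV'reach x).mpr h)
          · rcases (h1 p.1).mpr hp1 with hpv | hpf
            · exact Or.inl ((hV'reach x).mpr (h3 p hp hpv _ hp2))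
            · rcases hd p.1 hpf with hpv | hlook
              · exact Or.inl ((hV'reach x).mpr (h3 p hp hpv _ hp2))
              · exact hlook p.2 (pvGet_of_nodup graph p.1 p.2 hnd hp) x hp2
        by_cases heqset : PySem.Set.equal (pvRelax graph reach) reach = true
        · rw [dif_pos heqset]
          have hstable := (PySem.Set.equal_iff _ _).mp heqset
          have hF''V' : ∀ x ∈ F'', x ∈ V' :=
            fun x hx => (hV'reach x).mpr ((hstable x).mp (hF''exp x hx))
          have htF'' : target ∉ F'' :=
            fun h => htr ((hstable target).mp (hF''exp target h))
          rw [pvBLoop]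
          by_cases hF'' : F'' = []
          · rw [dif_pos hF'']
          · rw [dif_neg hF'']
            rw [pv_inner_visited graph target (d + 1) F'' V' [] hF''V' htF'']
            show pvBLoop graph target V' [] (d + 1 + 1) = -1
            rw [pvBLoop]
            simp
        · rw [dif_neg heqset]
          have hnewex : ∃ x, x ∈ pvRelax graph reach ∧ x ∉ reach := by
            by_contra hall
            apply heqset
            apply (PySem.Set.equal_iff _ _).mpr
            intro x
            constructor
            · intro hx
              by_contra hxr
              exact hall ⟨x, hx, hxr⟩
            · exact hsub x
          obtain ⟨x, hxin, hxout⟩ := hnewex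
          have hxtk : x ∈ target :: graph.map Prod.fst := by
            rcases (hE x).mp hxin with h | ⟨p, hp, _, hp2⟩
            · exact absurd h hxout
            · rcases hcl p hp x hp2 with h | h
              · exact List.mem_cons_of_mem _ h
              · exact h ▸ List.mem_cons_self ..
          have hmlt : ((target :: graph.map Prod.fst).filter
              (fun z => !(PySem.Set.contains (pvRelax graph reach) z))).length <
              ((target :: graph.map Prod.fst).filter
              (fun z => !(PySem.Set.contains reach z))).length := by
            apply pv_length_filter_lt _ _ _ ?_ x hxtk ?_ ?_
            · intro k hk
              simp only [Bool.not_eq_true'] at hk ⊢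
              cases h : PySem.Set.contains reach k with
              | false => rfl
              | true =>
                have hmem := hsub k ((PySem.Set.contains_iff _ _).mp h)
                have htrue := (PySem.Set.contains_iff _ _).mpr hmem
                rw [hk] at htrue
                simp at htrue
            · simp only [Bool.not_eq_false']
              exact (PySem.Set.contains_iff _ _).mpr hxin
            · simp only [Bool.not_eq_true']
              cases h : PySem.Set.contains reach x with
              | false => rfl
              | true => exact absurd ((PySem.Set.contains_iff _ _).mp h) hxout
          apply ih V' F'' (pvRelax graph reach) (d + 1) (by omega)
          · intro z
            constructor
            · rintro (h | h)
              · exact hsub z ((hV'reach z).mp h)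
              · exact hF''exp z h
            · exact hexp_sub z
          · exact fun h => htr ((hV'reach target).mp h)
          · intro p hp hpv nb hnb
            exact (hE nb).mpr (Or.inr ⟨p, hp, (hV'reach p.1).mp hpv, hnb⟩)
          · intro z hz
            rcases (hE z).mp hz with h | ⟨p, hp, _, hp2⟩
            · exact h5 z h
            · exact hcl p hp z hp2

-- ===== VERDICT (by name: the statement is the Claim_ definition above) =====
theorem find_degrees_of_separation_spec : Claim_equal_find_degrees_of_separation := by
  unfold Claim_equal_find_degrees_of_separation
  intro graph start_actor target_actor _ hpre
  unfold Spec_find_degrees_of_separation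
  unfold find_degrees_of_separation find_degrees_of_separation_alt
  obtain ⟨hnd, hrest⟩ := hpre
  by_cases hst : start_actor == target_actor
  · simp [hst]
  · simp only [hst, Bool.false_eq_true, if_false]
    have hst' : start_actor ≠ target_actor := by simpa using hst
    rcases hrest with h | ⟨hs, hcl⟩
    · exact absurd h hst'
    have hmain := pv_main graph target_actor (pvUnvisited graph PySem.Set.empty + 1)
      PySem.Set.empty (by omega) 3 [start_actor] [] (by simp) 0
    have hbridge := pvBLoop_eq_bCont graph target_actor PySem.Set.empty [start_actor] 0 (by simp)
    simp only [List.map_cons, List.map_nil, List.append_nil] at hmain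
    rw [hmain, ← hbridge]
    have hof : PySem.Set.ofList [start_actor] = [start_actor] := rfl
    rw [hof]
    apply pv_loop_eq graph target_actor hnd hcl
      (((target_actor :: graph.map Prod.fst).filter
        (fun x => !(PySem.Set.contains [start_actor] x))).length + 1)
      PySem.Set.empty [start_actor] [start_actor] 0 (by omega)
    · intro x
      simp [PySem.Set.empty]
    · simp [PySem.Set.empty]
    · intro p _ hpv
      simp [PySem.Set.empty] at hpv
    · intro x hx
      simp at hx
      exact Or.inl (hx ▸ hs)
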